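-- pv_equiv track=rewrite | github.com/gosling123/epoch_GP | Model/kernels.py | extract_numbers
-- ===== SOURCE A (Python) =====
-- def extract_numbers(arr):
--     exclusions = ['EXP', 'MATERN_3_2', 'MATERN_5_2', 'RBF', 'RAT_QUAD']
--     numbers = []
--
--     for item in arr:
--         # Check if any exclusion phrase is part of the item
--         for exclusion in exclusions:
--             if exclusion in item:
--                 # If exclusion phrase found, remove any numbers attached to it
--                 item = item.replace(exclusion, '')  # Remove the exclusion phrase entirely
--
--         # Now, extract numbers from the remaining part of the item
--         num = ''
--         for char in item:
--             if char.isdigit():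
--                 num += char  # Build the number as a string
--             elif num:
--                 numbers.append(int(num))  # Convert and store when non-digit appears
--                 num = ''
--         if num:  # Add the last number if it exists
--             numbers.append(int(num))
--
--     return numbers
-- ===== SOURCE B (Python) =====
-- def extract_numbers(arr):
--     exclusions = ['EXP', 'MATERN_3_2', 'MATERN_5_2', 'RBF', 'RAT_QUAD']
--     numbers = []
--     for item in arr:
--         for exclusion in exclusions:
--             if exclusion in item:
--                 item = item.replace(exclusion, '')
--         # scan for maximal digit runs: no accumulator buffer, no flush branches
--         i, n = 0, len(item)
--         while i < n:
--             if item[i].isdigit():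
--                 j = i + 1
--                 while j < n and item[j].isdigit():
--                     j += 1
--                 numbers.append(int(item[i:j]))
--                 i = j
--             else:
--                 i += 1
--     return numbers
-- ===== Notes on version B (the rewrite author's own statement) =====
-- stated objective: simpler
-- what changed: Replaced the char-by-char accumulator state machine (num buffer, mid-loop flush and trailing flush) with a direct scan that jumps over each maximal digit run and converts it in one step.
import Mathlib
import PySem

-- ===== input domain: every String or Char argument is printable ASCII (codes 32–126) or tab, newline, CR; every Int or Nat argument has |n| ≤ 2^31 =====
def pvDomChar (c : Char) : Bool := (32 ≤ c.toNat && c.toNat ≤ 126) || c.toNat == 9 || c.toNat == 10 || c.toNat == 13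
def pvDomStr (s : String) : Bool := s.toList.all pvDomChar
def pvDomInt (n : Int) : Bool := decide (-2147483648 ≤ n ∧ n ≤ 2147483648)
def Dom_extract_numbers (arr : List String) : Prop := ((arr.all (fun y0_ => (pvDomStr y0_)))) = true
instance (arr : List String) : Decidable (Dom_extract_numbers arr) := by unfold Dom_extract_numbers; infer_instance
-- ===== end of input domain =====

-- B replaces A's char-accumulator state machine with a maximal-digit-run scan; objective: simpler.


-- ===== PORT A =====
def pvExclusions : List String := ["EXP", "MATERN_3_2", "MATERN_5_2", "RBF", "RAT_QUAD"]

-- the 'for exclusion in exclusions' removal loop (shared text in both Pythons)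
def pvClean (item : String) : String :=
  pvExclusions.foldl (fun it ex => if PySem.Str.isIn ex it then PySem.Str.replace it ex "" else it) item

-- A's inner 'for char in item' loop with the 'num' buffer, plus the trailing 'if num' flush
def loopA (ns : List Int) (num : List Char) : List Char → List Int
  | [] => if num = [] then ns else ns ++ [(PySem.Int.ofChars? num).getD 0]
  | c :: cs =>
    if PySem.Chars.isdigit c then loopA ns (num ++ [c]) cs
    else if num ≠ [] then loopA (ns ++ [(PySem.Int.ofChars? num).getD 0]) [] cs
    else loopA ns num cs

def extract_numbers (arr : List String) : List Int :=
  arr.foldl (fun ns item => loopA ns [] (pvClean item).toList) []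

-- ===== PORT B =====
-- B's 'while i < n' scan: skip a non-digit; at a digit, the inner 'while j' consumes the
-- maximal digit run item[i:j] (= c :: takeWhile), converts it, and resumes at j (= dropWhile).
def grabB : List Char → List Int
  | [] => []
  | c :: cs =>
    if PySem.Chars.isdigit c then
      (PySem.Int.ofChars? (c :: cs.takeWhile PySem.Chars.isdigit)).getD 0
        :: grabB (cs.dropWhile PySem.Chars.isdigit)
    else grabB cs
termination_by cs => cs.length
decreasing_by
  · exact Nat.lt_succ_of_le (List.length_dropWhile_le _ _)
  · exact Nat.lt_succ_self _

def extract_numbers_alt (arr : List String) : List Int :=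
  arr.foldl (fun ns item => ns ++ grabB (pvClean item).toList) []

-- ===== PRECONDITION & SPEC =====
def Spec_extract_numbers (arr : List String) (out : List Int) : Prop := out = extract_numbers_alt arr
instance (arr : List String) (out : List Int) : Decidable (Spec_extract_numbers arr out) := by unfold Spec_extract_numbers; infer_instance

-- ===== CLAIM (what is proved, stated in full; the proofs are below) =====
def Claim_equal_extract_numbers : Prop := ∀ (arr : List String), Dom_extract_numbers arr → Spec_extract_numbers arr (extract_numbers arr)

-- ===== LEMMAS AND PROOFS =====
lemma loopA_eq : ∀ (cs : List Char) (ns : List Int) (num : List Char),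
    loopA ns num cs = ns ++ (if num = [] then grabB cs
      else (PySem.Int.ofChars? (num ++ cs.takeWhile PySem.Chars.isdigit)).getD 0
        :: grabB (cs.dropWhile PySem.Chars.isdigit)) := by
  intro cs
  induction cs with
  | nil =>
    intro ns num
    rcases num with _ | ⟨c, num⟩ <;> simp [loopA, grabB]
  | cons c cs ih =>
    intro ns num
    by_cases hd : PySem.Chars.isdigit c
    · rcases num with _ | ⟨a, num⟩
      · simp [loopA, hd, ih, grabB]
      · simp [loopA, hd, ih, List.takeWhile_cons_of_pos hd,
          List.dropWhile_cons_of_pos hd]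
    · rcases num with _ | ⟨a, num⟩
      · simp [loopA, hd, ih, grabB]
      · simp [loopA, hd, ih, grabB, List.takeWhile_cons_of_neg hd,
          List.dropWhile_cons_of_neg hd]

lemma step_eq : (fun (ns : List Int) (item : String) => loopA ns [] (pvClean item).toList)
    = fun ns item => ns ++ grabB (pvClean item).toList := by
  funext ns item
  simp [loopA_eq]

-- ===== VERDICT (by name: the statement is the Claim_ definition above) =====
theorem extract_numbers_spec : Claim_equal_extract_numbers := by
  intro arr _
  unfold Spec_extract_numbers extract_numbers extract_numbers_alt
  rw [step_eq]
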